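-- pv_equiv track=rewrite | github.com/cparadis6191/read_bits | read_bits/read_bits.py | read_bits_from_bytearray
-- ===== SOURCE A (Python) =====
-- def read_bits_from_byte(byte, first_bit_index=0, last_bit_index=7):
--     if first_bit_index < 0:
--         raise ValueError
--
--     if last_bit_index < 0:
--         raise ValueError
--
--     val = byte
--
--     val >>= 7 - last_bit_index
--
--     bit_cnt = last_bit_index - first_bit_index + 1
--     mask = (1 << bit_cnt) - 1
--
--     val &= mask
--
--     return val
--
-- def read_bits_from_bytearray(byte_array, first_byte_index=0, first_bit_index=0, bit_count=8):
--     if first_byte_index < 0: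
--         raise ValueError
--
--     if first_bit_index < 0:
--         raise ValueError
--
--     if bit_count < 0:
--         raise ValueError
--
--     val = 0
--
--     temp_byte_index = first_byte_index
--
--     temp_first_bit_index = first_bit_index
--
--     # Carry first bit index over into the first byte index.
--     if temp_first_bit_index > 8:
--         temp_byte_index += int(temp_first_bit_index / 8)
--
--         temp_first_bit_index %= 8
--
--     bits_remaining = bit_count
--
--     while bits_remaining > 0:
--         bits_remaining_in_byte = min(bits_remaining, 8 - temp_first_bit_index)
--
--         temp_last_bit_index = temp_first_bit_index + bits_remaining_in_byte - 1
--
--         val = (val << bits_remaining_in_byte) | read_bits_from_byte(byte_array[temp_byte_index],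
--                 temp_first_bit_index, temp_last_bit_index)
--
--         temp_byte_index += 1
--         temp_first_bit_index = 0
--         bits_remaining = bits_remaining - bits_remaining_in_byte
--
--     return val
-- ===== SOURCE B (Python) =====
-- def read_bits_from_bytearray(byte_array, first_byte_index=0, first_bit_index=0, bit_count=8):
--     if first_byte_index < 0:
--         raise ValueError
--     if first_bit_index < 0:
--         raise ValueError
--     if bit_count < 0:
--         raise ValueError
--     if bit_count == 0:
--         return 0
--     start = first_byte_index * 8 + first_bit_index
--     end = start + bit_count - 1
--     acc = 0
--     for i in range(start // 8, end // 8 + 1):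
--         acc = (acc << 8) | (byte_array[i] & 0xff)
--     acc >>= (end // 8 + 1) * 8 - 1 - end
--     return acc & ((1 << bit_count) - 1)
-- ===== Notes on version B (the rewrite author's own statement) =====
-- stated objective: alternative
-- what changed: A carves the requested bits chunk-by-chunk in a while loop, shifting and masking a slice of each byte via a helper with running byte/bit cursors and carry logic; B normalizes to an absolute start bit, accumulates the covered whole bytes base-256 in one pass, then applies a single trailing shift and a single mask.
import Mathlib
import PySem

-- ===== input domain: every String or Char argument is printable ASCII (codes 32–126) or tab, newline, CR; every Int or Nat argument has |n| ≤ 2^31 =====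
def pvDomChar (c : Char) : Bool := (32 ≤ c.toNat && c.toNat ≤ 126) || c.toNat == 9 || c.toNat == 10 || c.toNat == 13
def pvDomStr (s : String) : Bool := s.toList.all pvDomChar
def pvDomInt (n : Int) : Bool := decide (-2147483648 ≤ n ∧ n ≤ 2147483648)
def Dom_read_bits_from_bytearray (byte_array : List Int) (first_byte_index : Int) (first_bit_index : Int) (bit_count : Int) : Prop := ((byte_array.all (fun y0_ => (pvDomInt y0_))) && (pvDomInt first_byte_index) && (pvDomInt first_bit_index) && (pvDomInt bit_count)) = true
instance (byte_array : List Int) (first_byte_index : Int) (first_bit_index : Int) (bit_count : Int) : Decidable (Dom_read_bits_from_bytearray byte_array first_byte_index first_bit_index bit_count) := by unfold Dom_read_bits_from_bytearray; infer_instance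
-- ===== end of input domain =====

-- B replaces A's per-chunk bit carving (a while loop slicing each byte with a shift/mask
-- helper) by one pass over whole bytes: accumulate base 256, then one shift and one mask.

-- ===== PORT A =====
def read_bits_from_byte (byte : Int) (first_bit_index : Int) (last_bit_index : Int) : Int :=
  if first_bit_index < 0 then 0        -- raise ValueError (excluded by Pre_)
  else if last_bit_index < 0 then 0    -- raise ValueError (excluded by Pre_)
  else
    let val := byte >>> (7 - last_bit_index).toNat
    let bit_cnt := last_bit_index - first_bit_index + 1
    let mask := ((1 : Int) <<< bit_cnt.toNat) - 1
    PySem.Int.band val mask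

-- the `while bits_remaining > 0` loop; fuel bit_count.toNat + 1 suffices on Pre_
def read_bits_loop (byte_array : List Int) : Nat → Int → Int → Int → Int → Int
  | 0, _, _, _, val => val
  | fuel+1, bits_remaining, temp_byte_index, temp_first_bit_index, val =>
    if 0 < bits_remaining then
      let brb := min bits_remaining (8 - temp_first_bit_index)
      let tlbi := temp_first_bit_index + brb - 1
      let val' := PySem.Int.bor (val <<< brb.toNat)
        (read_bits_from_byte (PySem.List.pyGetD byte_array temp_byte_index 0) temp_first_bit_index tlbi)
      read_bits_loop byte_array fuel (bits_remaining - brb) (temp_byte_index + 1) 0 val'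
    else val

def read_bits_from_bytearray (byte_array : List Int) (first_byte_index : Int) (first_bit_index : Int) (bit_count : Int) : Int :=
  if first_byte_index < 0 then 0       -- raise ValueError (excluded by Pre_)
  else if first_bit_index < 0 then 0   -- raise ValueError (excluded by Pre_)
  else if bit_count < 0 then 0         -- raise ValueError (excluded by Pre_)
  else
    let temp_byte_index := if 8 < first_bit_index then first_byte_index + PySem.Int.truncdiv first_bit_index 8 else first_byte_index
    let temp_first_bit_index := if 8 < first_bit_index then PySem.Int.mod first_bit_index 8 else first_bit_index
    read_bits_loop byte_array (bit_count.toNat + 1) bit_count temp_byte_index temp_first_bit_index 0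

-- ===== PORT B =====
def read_bits_from_bytearray_alt (byte_array : List Int) (first_byte_index : Int) (first_bit_index : Int) (bit_count : Int) : Int :=
  if first_byte_index < 0 then 0       -- raise ValueError (excluded by Pre_)
  else if first_bit_index < 0 then 0   -- raise ValueError (excluded by Pre_)
  else if bit_count < 0 then 0         -- raise ValueError (excluded by Pre_)
  else if bit_count = 0 then 0
  else
    let start := first_byte_index * 8 + first_bit_index
    let stop := start + bit_count - 1
    let acc := (PySem.List.pyRange (PySem.Int.floordiv start 8) (PySem.Int.floordiv stop 8 + 1)).foldl
      (fun acc i => PySem.Int.bor (acc <<< (8 : Nat)) (PySem.Int.band (PySem.List.pyGetD byte_array i 0) 255)) 0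
    PySem.Int.band (acc >>> ((PySem.Int.floordiv stop 8 + 1) * 8 - 1 - stop).toNat)
      (((1 : Int) <<< bit_count.toNat) - 1)

-- ===== PRECONDITION & SPEC =====
-- Pre_ excludes exactly where the Python A raises: ValueError on a negative argument and
-- IndexError when the last touched byte (index stop // 8) is past the end of the array.
def Pre_read_bits_from_bytearray (byte_array : List Int) (first_byte_index : Int) (first_bit_index : Int) (bit_count : Int) : Prop :=
  0 ≤ first_byte_index ∧ 0 ≤ first_bit_index ∧ 0 ≤ bit_count ∧
    (bit_count = 0 ∨ PySem.Int.floordiv (first_byte_index * 8 + first_bit_index + bit_count - 1) 8 < PySem.List.len byte_array)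
instance (byte_array : List Int) (first_byte_index : Int) (first_bit_index : Int) (bit_count : Int) : Decidable (Pre_read_bits_from_bytearray byte_array first_byte_index first_bit_index bit_count) := by unfold Pre_read_bits_from_bytearray; infer_instance
def pvWitness_read_bits_from_bytearray : List Int × Int × Int × Int := ([171, 205], 0, 3, 7)

def Spec_read_bits_from_bytearray (byte_array : List Int) (first_byte_index : Int) (first_bit_index : Int) (bit_count : Int) (out : Int) : Prop := out = read_bits_from_bytearray_alt byte_array first_byte_index first_bit_index bit_count
instance (byte_array : List Int) (first_byte_index : Int) (first_bit_index : Int) (bit_count : Int) (out : Int) : Decidable (Spec_read_bits_from_bytearray byte_array first_byte_index first_bit_index bit_count out) := by unfold Spec_read_bits_from_bytearray; infer_instance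

-- ===== CLAIM (what is proved, stated in full; the proofs are below) =====
def Claim_equal_read_bits_from_bytearray : Prop := ∀ (byte_array : List Int) (first_byte_index : Int) (first_bit_index : Int) (bit_count : Int), Dom_read_bits_from_bytearray byte_array first_byte_index first_bit_index bit_count → Pre_read_bits_from_bytearray byte_array first_byte_index first_bit_index bit_count → Spec_read_bits_from_bytearray byte_array first_byte_index first_bit_index bit_count (read_bits_from_bytearray byte_array first_byte_index first_bit_index bit_count)

-- ===== LEMMAS AND PROOFS =====

-- bit p of the MSB-first bit stream over the (0-defaulted) byte list
def pvBit (ba : List Int) (p : Nat) : Int := ((ba.getD (p / 8) 0) >>> (7 - p % 8)) % 2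

-- value of the c bits of that stream starting at position s
def pvRef (ba : List Int) (s : Nat) : Nat → Int
  | 0 => 0
  | c+1 => pvRef ba s c * 2 + pvBit ba (s + c)

theorem pvBit_bounds (ba : List Int) (p : Nat) : 0 ≤ pvBit ba p ∧ pvBit ba p < 2 :=
  ⟨Int.emod_nonneg _ (by norm_num), Int.emod_lt_of_pos _ (by norm_num)⟩

theorem pvRef_bounds (ba : List Int) (s : Nat) : ∀ c, 0 ≤ pvRef ba s c ∧ pvRef ba s c < 2^c := by
  intro c
  induction c with
  | zero => simp [pvRef]
  | succ c ih =>
    have hb := pvBit_bounds ba (s + c)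
    constructor
    · simp only [pvRef]; nlinarith [ih.1, hb.1]
    · have h2 : (2:Int)^(c+1) = 2^c * 2 := by ring
      simp only [pvRef, h2]; nlinarith [ih.2, hb.2]

theorem pvRef_split (ba : List Int) (s c1 : Nat) : ∀ c2, pvRef ba s (c1 + c2) = pvRef ba s c1 * 2^c2 + pvRef ba (s + c1) c2 := by
  intro c2
  induction c2 with
  | zero => simp [pvRef]
  | succ c2 ih =>
    show pvRef ba s (c1 + c2 + 1) = _
    simp only [pvRef]
    rw [ih, show s + (c1 + c2) = s + c1 + c2 from by omega]
    ring

theorem emod_two_pow_succ (x : Int) (k : Nat) : x % 2^(k+1) = (x / 2 % 2^k) * 2 + x % 2 := by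
  have h : x / 2 / 2^k = x / (2 * 2^k) := Int.ediv_ediv_of_nonneg (by norm_num)
  rw [Int.emod_def, Int.emod_def, Int.emod_def, pow_succ,
    show (2:Int)^k * 2 = 2 * 2^k from by ring, ← h]
  ring

theorem pvChunk (ba : List Int) (i f : Nat) : ∀ k, f + k ≤ 8 →
    pvRef ba (8*i + f) k = ((ba.getD i 0) >>> (8 - (f + k))) % 2^k := by
  intro k
  induction k with
  | zero => intro _; simp [pvRef]
  | succ k ih =>
    intro h
    have hdiv : (8*i + (f + k)) / 8 = i := by omega
    have hmod : (8*i + (f + k)) % 8 = f + k := by omega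
    show pvRef ba (8*i + f) k * 2 + pvBit ba (8*i + f + k) = _
    rw [ih (by omega)]
    unfold pvBit
    rw [show 8*i + f + k = 8*i + (f + k) from by omega, hdiv, hmod]
    have e3 : (((2:Nat)^(7 - (f + k)) : Nat) : Int) * 2 = (((2:Nat)^(8 - (f + k)) : Nat) : Int) := by
      push_cast
      rw [← pow_succ]
      congr 1
      omega
    have e2 : (ba.getD i 0) >>> (7 - (f + k)) / 2 = (ba.getD i 0) >>> (8 - (f + k)) := by
      rw [Int.shiftRight_eq_div_pow, Int.shiftRight_eq_div_pow,
        Int.ediv_ediv_of_nonneg (by positivity), e3]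
    rw [show 8 - (f + (k+1)) = 7 - (f + k) from by omega,
      emod_two_pow_succ ((ba.getD i 0) >>> (7 - (f + k))) k, e2]

theorem band_mask (a : Int) (k : Nat) : PySem.Int.band a ((2:Int)^k - 1) = a % 2^k := by
  have hpos : (0:Int) < 2^k := by positivity
  have hcast : ((2:Int)^k) = ((2^k : Nat) : Int) := by push_cast; ring
  have htn : ((2:Int)^k - 1).toNat = 2^k - 1 := by omega
  by_cases ha : 0 ≤ a
  · rw [PySem.Int.band_of_nonneg ha (by omega), htn, Nat.and_two_pow_sub_one_eq_mod]
    have h1 : a = ((a.toNat : Int)) := (Int.toNat_of_nonneg ha).symm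
    rw [hcast]
    conv_rhs => rw [h1]
    push_cast
    rfl
  · have hb : (0:Int) ≤ 2^k - 1 := by omega
    have hband : PySem.Int.band a ((2:Int)^k - 1) =
        (((((2:Int)^k - 1).toNat - (((2:Int)^k - 1).toNat &&& (-a - 1).toNat) : Nat)) : Int) := by
      simp only [PySem.Int.band, if_neg ha, if_pos hb]
    rw [hband, htn, Nat.and_comm, Nat.and_two_pow_sub_one_eq_mod]
    set n := (-a - 1).toNat with hn
    have han : a = -(n:Int) - 1 := by omega
    have hr := Int.emod_nonneg (n:Int) (show ((2:Int)^k) ≠ 0 from by omega)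
    have hr2 := Int.emod_lt_of_pos (n:Int) hpos
    have hnr := Int.mul_ediv_add_emod (n:Int) (2^k)
    have hx : a = (2^k - 1 - (n:Int) % 2^k) + 2^k * (-(((n:Int) / 2^k) + 1)) := by
      rw [han]
      nlinarith [hnr]
    have key : a % 2^k = 2^k - 1 - (n:Int) % 2^k := by
      rw [hx, Int.add_mul_emod_self_left]
      exact Int.emod_eq_of_lt (by omega) (by omega)
    rw [key]
    have hcast2 : ((n % 2^k : Nat) : Int) = (n:Int) % 2^k := by push_cast; rfl
    omega

theorem bor_shift_add (a c : Int) (k : Nat) (ha : 0 ≤ a) (hc : 0 ≤ c) (hck : c < 2^k) :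
    PySem.Int.bor (a <<< k) c = a * 2^k + c := by
  have hcast : ((2:Int)^k) = ((2^k : Nat) : Int) := by push_cast; ring
  rw [Int.shiftLeft_eq, PySem.Int.bor_of_nonneg (by positivity) hc]
  have h2k : ((2:Int)^k).toNat = 2^k := by omega
  have h1 : (a * 2^k).toNat = a.toNat * 2^k := by
    rw [Int.toNat_mul ha (by positivity), h2k]
  have hck' : c.toNat < 2^k := by omega
  rw [h1, show a.toNat * 2^k = 2^k * a.toNat from by ring, ← Nat.two_pow_add_eq_or_of_lt hck']
  push_cast
  rw [Int.toNat_of_nonneg ha, Int.toNat_of_nonneg hc]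
  ring

theorem band255_eq (ba : List Int) (i : Nat) :
    PySem.Int.band (ba.getD i 0) 255 = pvRef ba (8*i) 8 := by
  have h := pvChunk ba i 0 8 (by omega)
  rw [show 8*i + 0 = 8*i from by omega] at h
  rw [show (255:Int) = 2^8 - 1 from by norm_num, band_mask, h]
  norm_num

theorem rbfb_eq (ba : List Int) (i tfbi m : Nat) (h1 : 1 ≤ m) (h2 : tfbi + m ≤ 8) :
    read_bits_from_byte (ba.getD i 0) (tfbi : Int) ((tfbi : Int) + (m : Int) - 1) = pvRef ba (8*i + tfbi) m := by
  have hnot1 : ¬ ((tfbi : Int) < 0) := by omega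
  have hnot2 : ¬ ((tfbi : Int) + (m : Int) - 1 < 0) := by omega
  simp only [read_bits_from_byte, if_neg hnot1, if_neg hnot2]
  have e1 : (7 - ((tfbi : Int) + (m : Int) - 1)).toNat = 8 - (tfbi + m) := by omega
  have e2 : ((tfbi : Int) + (m : Int) - 1 - (tfbi : Int) + 1).toNat = m := by omega
  rw [e1, e2, Int.shiftLeft_eq, one_mul, band_mask, pvChunk ba i tfbi m h2]

theorem loop_eq (ba : List Int) : ∀ (fuel br tbi tfbi : Nat) (val : Int), 0 ≤ val → tfbi ≤ 7 → br ≤ fuel →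
    read_bits_loop ba fuel (br : Int) (tbi : Int) (tfbi : Int) val = val * 2^br + pvRef ba (8*tbi + tfbi) br := by
  intro fuel
  induction fuel with
  | zero =>
    intro br tbi tfbi val _ _ hf
    have : br = 0 := by omega
    subst this
    simp [read_bits_loop, pvRef]
  | succ fuel ih =>
    intro br tbi tfbi val hval htf hf
    rcases Nat.eq_zero_or_pos br with hbr | hbr
    · subst hbr; simp [read_bits_loop, pvRef]
    · simp only [read_bits_loop]
      rw [if_pos (by exact_mod_cast hbr)]
      set m := min br (8 - tfbi) with hm
      have hmcast : min (br : Int) (8 - (tfbi : Int)) = (m : Int) := by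
        rw [hm]; omega
      have hm1 : 1 ≤ m := by omega
      have hm2 : tfbi + m ≤ 8 := by omega
      have hRb := pvRef_bounds ba (8*tbi + tfbi) m
      rw [hmcast, PySem.List.pyGetD_natCast, rbfb_eq ba tbi tfbi m hm1 hm2,
        show ((m : Int)).toNat = m from by omega,
        bor_shift_add val _ m hval hRb.1 hRb.2,
        show (br : Int) - (m : Int) = ((br - m : Nat) : Int) from by omega,
        show (tbi : Int) + 1 = ((tbi + 1 : Nat) : Int) from by omega,
        show (0 : Int) = ((0 : Nat) : Int) from rfl,
        ih (br - m) (tbi + 1) 0 _ (by nlinarith [hRb.1]) (by omega) (by omega)]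
      rcases Nat.eq_or_lt_of_le (show m ≤ br from by omega) with hmb | hmb
      · rw [← hmb, Nat.sub_self]
        simp [pvRef]
      · have hsplit := pvRef_split ba (8*tbi + tfbi) m (br - m)
        rw [show m + (br - m) = br from by omega,
          show 8*tbi + tfbi + m = 8*(tbi+1) + 0 from by omega] at hsplit
        rw [hsplit, show (2:Int)^br = 2^m * 2^(br - m) from by
          rw [← pow_add]; congr 1; omega]
        ring

theorem fold_eq (ba : List Int) : ∀ (n : Nat) (lo : Nat) (a : Int), 0 ≤ a →
    (PySem.List.pyRange (lo : Int) ((lo : Int) + (n : Int))).foldl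
      (fun acc i => PySem.Int.bor (acc <<< (8 : Nat)) (PySem.Int.band (PySem.List.pyGetD ba i 0) 255)) a
    = a * 2^(8*n) + pvRef ba (8*lo) (8*n) := by
  intro n
  induction n with
  | zero =>
    intro lo a ha
    simp [pysem, pvRef]
  | succ n ih =>
    intro lo a ha
    rw [PySem.List.pyRange_one_cons (by omega), List.foldl_cons]
    have hRb := pvRef_bounds ba (8*lo) 8
    have hstep : PySem.Int.bor (a <<< (8:Nat)) (PySem.Int.band (PySem.List.pyGetD ba (lo : Int) 0) 255)
        = a * 2^8 + pvRef ba (8*lo) 8 := by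
      rw [PySem.List.pyGetD_natCast, band255_eq, bor_shift_add a _ 8 ha hRb.1 hRb.2]
    rw [hstep, show ((lo:Int) + 1) = ((lo+1 : Nat) : Int) from by omega,
      show ((lo:Int) + ((n+1 : Nat) : Int)) = ((lo+1 : Nat) : Int) + (n : Int) from by omega,
      ih (lo+1) _ (by nlinarith [hRb.1])]
    have hsplit := pvRef_split ba (8*lo) 8 (8*n)
    rw [show 8 + 8*n = 8*(n+1) from by omega, show 8*lo + 8 = 8*(lo+1) from by omega] at hsplit
    rw [hsplit, show 8*(n+1) = 8 + 8*n from by omega, pow_add]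
    ring

theorem ref_shift (ba : List Int) (s c t : Nat) (h : t ≤ c) :
    (pvRef ba s c) >>> t = pvRef ba s (c - t) := by
  rw [Int.shiftRight_eq_div_pow]
  have hsplit := pvRef_split ba s (c - t) t
  rw [show c - t + t = c from by omega] at hsplit
  have hb := pvRef_bounds ba (s + (c - t)) t
  have hcast : ((2:Int)^t) = ((2^t : Nat) : Int) := by push_cast; ring
  rw [hsplit, add_comm, ← hcast, Int.add_mul_ediv_right _ _ (show ((2:Int)^t) ≠ 0 from by positivity),
    Int.ediv_eq_zero_of_lt hb.1 hb.2, zero_add]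

theorem ref_mod (ba : List Int) (s c k : Nat) (h : k ≤ c) :
    (pvRef ba s c) % 2^k = pvRef ba (s + (c - k)) k := by
  have hsplit := pvRef_split ba s (c - k) k
  rw [show c - k + k = c from by omega] at hsplit
  have hb := pvRef_bounds ba (s + (c - k)) k
  rw [hsplit, add_comm, show pvRef ba s (c - k) * 2^k = 2^k * pvRef ba s (c - k) from by ring,
    Int.add_mul_emod_self_left, Int.emod_eq_of_lt hb.1 hb.2]

theorem A_eq (ba : List Int) (F f c : Nat) :
    read_bits_from_bytearray ba (F : Int) (f : Int) (c : Int) = pvRef ba (8*F + f) c := by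
  have hnF : ¬ ((F:Int) < 0) := by omega
  have hnf : ¬ ((f:Int) < 0) := by omega
  have hnc : ¬ ((c:Int) < 0) := by omega
  have htc : ((c:Int)).toNat = c := by omega
  by_cases h8 : 8 < (f:Int)
  · -- first_bit_index > 8: carry into the byte index
    simp only [read_bits_from_bytearray, if_neg hnF, if_neg hnf, if_neg hnc, if_pos h8, htc]
    have htd : PySem.Int.truncdiv (f:Int) 8 = ((f / 8 : Nat) : Int) := by
      unfold PySem.Int.truncdiv
      rw [Int.tdiv_eq_ediv_of_nonneg (by omega)]
      omega
    have hmd : PySem.Int.mod (f:Int) 8 = ((f % 8 : Nat) : Int) := by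
      rw [PySem.Int.mod_eq_emod_of_pos (by norm_num)]
      omega
    rw [htd, hmd, show (F:Int) + ((f / 8 : Nat) : Int) = ((F + f / 8 : Nat) : Int) from by omega,
      loop_eq ba (c+1) c (F + f / 8) (f % 8) 0 le_rfl (by omega) (by omega),
      show 8*(F + f / 8) + f % 8 = 8*F + f from by omega]
    ring
  · simp only [read_bits_from_bytearray, if_neg hnF, if_neg hnf, if_neg hnc, if_neg h8, htc]
    by_cases hf8 : f = 8
    · -- first_bit_index = 8: the first loop iteration reads zero bits
      subst hf8
      rcases Nat.eq_zero_or_pos c with hc | hc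
      · subst hc
        simp [read_bits_loop, pvRef]
      · simp only [read_bits_loop]
        rw [if_pos (by exact_mod_cast hc)]
        have hmin : min ((c:Int)) (8 - ((8:Nat):Int)) = 0 := by omega
        rw [hmin]
        have hrb : read_bits_from_byte (PySem.List.pyGetD ba (F:Int) 0) (((8:Nat)):Int) (((8:Nat):Int) + 0 - 1) = 0 := by
          simp only [read_bits_from_byte]
          rw [if_neg (by omega), if_neg (by omega),
            show ((((8:Nat)):Int) + 0 - 1 - (((8:Nat)):Int) + 1).toNat = 0 from by omega]
          simp [PySem.Int.band_zero]
        rw [hrb, PySem.Int.bor_zero, show ((0:Int)).toNat = 0 from rfl,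
          show (0:Int) <<< (0:Nat) = 0 from by rw [Int.shiftLeft_eq]; ring,
          show ((c:Int)) - 0 = ((c:Nat):Int) from by omega,
          show ((F:Int)) + 1 = (((F+1:Nat)):Int) from by omega]
        have hl := loop_eq ba c c (F+1) 0 0 le_rfl (by omega) le_rfl
        rw [Nat.cast_zero] at hl
        rw [hl, show 8*(F+1) + 0 = 8*F + 8 from by omega]
        ring
    · -- first_bit_index ≤ 7
      have hf7 : f ≤ 7 := by omega
      rw [loop_eq ba (c+1) c F f 0 le_rfl (by omega) (by omega)]
      ring

theorem B_eq (ba : List Int) (F f c : Nat) (hc : 1 ≤ c) :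
    read_bits_from_bytearray_alt ba (F : Int) (f : Int) (c : Int) = pvRef ba (8*F + f) c := by
  have hnF : ¬ ((F:Int) < 0) := by omega
  have hnf : ¬ ((f:Int) < 0) := by omega
  have hnc : ¬ ((c:Int) < 0) := by omega
  have hne : ¬ ((c:Int) = 0) := by omega
  simp only [read_bits_from_bytearray_alt, if_neg hnF, if_neg hnf, if_neg hnc, if_neg hne]
  -- name the Nat-level quantities
  set S : Nat := 8*F + f with hS
  set E : Nat := S + c - 1 with hE
  set L : Nat := S / 8 with hL
  set H : Nat := E / 8 + 1 with hH
  set t : Nat := 8*H - 1 - E with ht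
  set n : Nat := H - L with hn
  have hLH : L ≤ H := by omega
  have hstart : (F:Int) * 8 + (f:Int) = ((S:Nat):Int) := by omega
  have hstop : ((S:Nat):Int) + (c:Int) - 1 = ((E:Nat):Int) := by omega
  have hfd1 : PySem.Int.floordiv ((S:Nat):Int) 8 = ((L:Nat):Int) := by
    rw [PySem.Int.floordiv_eq_ediv_of_pos (by norm_num)]
    omega
  have hfd2 : PySem.Int.floordiv ((E:Nat):Int) 8 + 1 = ((H:Nat):Int) := by
    rw [PySem.Int.floordiv_eq_ediv_of_pos (by norm_num)]
    omega
  have htLE : t ≤ 8*n := by omega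
  have hcLE : c ≤ 8*n - t := by omega
  rw [hstart, hstop, hfd1, hfd2, show ((H:Nat):Int) = ((L:Nat):Int) + ((n:Nat):Int) from by omega,
    fold_eq ba n L 0 le_rfl, zero_mul, zero_add,
    show ((((L:Nat):Int) + ((n:Nat):Int)) * 8 - 1 - ((E:Nat):Int)).toNat = t from by omega,
    ref_shift ba (8*L) (8*n) t htLE,
    show (((c:Nat):Int)).toNat = c from by omega,
    Int.shiftLeft_eq, one_mul, band_mask,
    ref_mod ba (8*L) (8*n - t) c hcLE,
    show 8*L + (8*n - t - c) = 8*F + f from by omega]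

-- ===== VERDICT (by name: the statement is the Claim_ definition above) =====
theorem read_bits_from_bytearray_spec : Claim_equal_read_bits_from_bytearray := by
  intro ba fbyi fbi bc _ hpre
  obtain ⟨h1, h2, h3, _⟩ := hpre
  unfold Spec_read_bits_from_bytearray
  obtain ⟨F, rfl⟩ : ∃ F : Nat, fbyi = (F : Int) := ⟨fbyi.toNat, by omega⟩
  obtain ⟨f, rfl⟩ : ∃ f : Nat, fbi = (f : Int) := ⟨fbi.toNat, by omega⟩
  obtain ⟨c, rfl⟩ : ∃ c : Nat, bc = (c : Int) := ⟨bc.toNat, by omega⟩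
  rcases Nat.eq_zero_or_pos c with hc | hc
  · subst hc
    rw [A_eq]
    simp [read_bits_from_bytearray_alt, pvRef, show ¬((F:Int) < 0) from by omega,
      show ¬((f:Int) < 0) from by omega]
  · rw [A_eq, B_eq ba F f c hc]
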